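-- pv_equiv track=rewrite | github.com/Bhargav02550/codemind-python | string game.py | can_strings_be_same
-- ===== SOURCE A (Python) =====
-- def can_strings_be_same(N, S):
--     A = ""  # Initialize Shankar's string A
--     B = ""  # Initialize Rama Reddy's string B
--
--     # Iterate through the characters in S
--     for char in S:
--         # Determine whose turn it is based on the length of A and B
--         if len(A) <= len(B):
--             A += char  # Shankar's turn
--         else:
--             B += char  # Rama Reddy's turn
--
--     # Check if A and B are the same at the end of the game
--     if A == B:
--         return "YES"
--     else:
--         return "NO"
-- ===== SOURCE B (Python) =====
-- def can_strings_be_same(N, S):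
--     # A's loop deals S alternately: evens of S to one player, odds to the other.
--     # The two hands are equal iff S pairs up into equal adjacent pairs
--     # (S[2k] == S[2k+1] for all k) and |S| is even. One pairwise scan, no
--     # accumulated strings, no length-comparison branch. N is unused, as in A.
--     it = iter(S)
--     pairs_ok = all(a == b for a, b in zip(it, it))
--     return "YES" if pairs_ok and len(S) % 2 == 0 else "NO"
-- ===== Notes on version B (the rewrite author's own statement) =====
-- stated objective: simpler
-- what changed: Instead of dealing characters into two accumulated strings via a running length-comparison branch and comparing the strings at the end, B does a single pairwise scan checking S[2k]==S[2k+1] for every adjacent pair plus an even-length check, building nothing.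
import Mathlib
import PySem

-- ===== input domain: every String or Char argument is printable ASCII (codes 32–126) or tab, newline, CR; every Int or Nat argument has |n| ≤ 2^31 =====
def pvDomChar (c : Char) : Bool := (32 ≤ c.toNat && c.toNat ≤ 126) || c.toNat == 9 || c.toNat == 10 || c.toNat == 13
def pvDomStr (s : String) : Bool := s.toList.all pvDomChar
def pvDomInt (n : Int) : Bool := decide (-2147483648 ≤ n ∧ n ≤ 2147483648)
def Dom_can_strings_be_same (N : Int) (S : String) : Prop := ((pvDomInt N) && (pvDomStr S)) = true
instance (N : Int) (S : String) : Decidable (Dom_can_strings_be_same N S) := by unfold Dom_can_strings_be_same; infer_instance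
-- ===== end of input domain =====

-- B replaces A's two accumulated strings and running length-comparison branch by a single
-- pairwise scan (adjacent pairs equal, length even); equivalence of return values is proved.

-- ===== PORT A =====
-- one loop step of A: append char to A or to B depending on the length comparison
-- (Python strings A, B tracked exactly as lists of their characters)
def pvStepA (p : List Char × List Char) (c : Char) : List Char × List Char :=
  if p.1.length ≤ p.2.length then (p.1 ++ [c], p.2) else (p.1, p.2 ++ [c])

def can_strings_be_same (N : Int) (S : String) : String :=
  let p := S.toList.foldl pvStepA ([], [])
  if p.1 == p.2 then "YES" else "NO"

-- ===== PORT B =====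
-- Source B's `all(a == b for a, b in zip(it, it))`: consume the characters two at a time
def pvPairsOk : List Char → Bool
  | a :: b :: r => a == b && pvPairsOk r
  | _ => true

def can_strings_be_same_alt (N : Int) (S : String) : String :=
  if pvPairsOk S.toList && S.toList.length % 2 == 0 then "YES" else "NO"

-- ===== PRECONDITION & SPEC =====
def Spec_can_strings_be_same (N : Int) (S : String) (out : String) : Prop := out = can_strings_be_same_alt N S
instance (N : Int) (S : String) (out : String) : Decidable (Spec_can_strings_be_same N S out) := by unfold Spec_can_strings_be_same; infer_instance

-- ===== CLAIM (what is proved, stated in full; the proofs are below) =====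
def Claim_equal_can_strings_be_same : Prop := ∀ (N : Int) (S : String), Dom_can_strings_be_same N S → Spec_can_strings_be_same N S (can_strings_be_same N S)

-- ===== LEMMAS AND PROOFS =====

-- the even- and odd-indexed characters of a list
mutual
def pvEvens : List Char → List Char
  | [] => []
  | a :: r => a :: pvOdds r
def pvOdds : List Char → List Char
  | [] => []
  | _ :: r => pvEvens r
end

-- A's loop invariant: from balanced hands the remaining chars deal evens to A and odds
-- to B; from hands where A is one ahead, the other way round.
theorem pvStepA_inv (l : List Char) : ∀ (A B : List Char),
    (A.length = B.length →
      l.foldl pvStepA (A, B) = (A ++ pvEvens l, B ++ pvOdds l)) ∧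
    (A.length = B.length + 1 →
      l.foldl pvStepA (A, B) = (A ++ pvOdds l, B ++ pvEvens l)) := by
  induction l with
  | nil => intro A B; simp [pvEvens, pvOdds]
  | cons a r ih =>
    intro A B
    constructor
    · intro h
      have hstep : pvStepA (A, B) a = (A ++ [a], B) := by
        simp [pvStepA, h]
      have h2 : (A ++ [a]).length = B.length + 1 := by simp [h]
      have := (ih (A ++ [a]) B).2 h2
      simp only [List.foldl_cons, hstep, this, pvEvens, pvOdds]
      simp
    · intro h
      have hstep : pvStepA (A, B) a = (A, B ++ [a]) := by
        simp [pvStepA, h]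
      have h2 : A.length = (B ++ [a]).length := by simp [h]
      have := (ih A (B ++ [a])).1 h2
      simp only [List.foldl_cons, hstep, this, pvEvens, pvOdds]
      simp

-- evens = odds iff every adjacent pair is equal and the length is even
theorem pvKey : ∀ l : List Char,
    (pvEvens l == pvOdds l) = (pvPairsOk l && l.length % 2 == 0)
  | [] => by decide
  | [a] => by simp [pvEvens, pvOdds, pvPairsOk]
  | a :: b :: r => by
    have ih := pvKey r
    have hmod : (r.length + 1 + 1) % 2 = r.length % 2 := by omega
    simp only [pvEvens, pvOdds, pvPairsOk, List.length_cons, List.cons_beq_cons, ih,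
      hmod, Bool.and_assoc]

-- ===== VERDICT (by name: the statement is the Claim_ definition above) =====
theorem can_strings_be_same_spec : Claim_equal_can_strings_be_same := by
  intro N S _
  unfold Spec_can_strings_be_same can_strings_be_same can_strings_be_same_alt
  have hinv := (pvStepA_inv S.toList [] []).1 rfl
  simp only [hinv, List.nil_append, pvKey]
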